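-- pv_equiv track=rewrite | github.com/Abdel-IBM-IA/Formation | Pycharm/lesStrings/mytools.py | extractcases
-- ===== SOURCE A (Python) =====
-- def extractcases(unechaine) :
--     """
-- Extrait tous les caractères minuscule et majuscule d'une chaine
--     :param unechaine:
--     :return List[(liste_minuscule, string),(liste_majuscule, string)]:
--     """
--     minustring = ""
--     majustring = ""
--     for charcourant in unechaine :
--         if 'a' <= charcourant <= 'z' :
--             minustring += charcourant
--         else :
--             if 'A' <= charcourant <= 'Z' :
--                 majustring += charcourant
--     return [minustring, majustring]
-- ===== SOURCE B (Python) =====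
-- def extractcases(unechaine):
--     minustring = ''.join(c for c in unechaine if 'a' <= c <= 'z')
--     majustring = ''.join(c for c in unechaine if 'A' <= c <= 'Z')
--     return [minustring, majustring]
-- ===== Notes on version B (the rewrite author's own statement) =====
-- stated objective: idiomatic
-- what changed: Replaced the single loop routing each character into two string accumulators by two independent filtered-join passes, one extracting lowercase and one extracting uppercase.
import Mathlib
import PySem

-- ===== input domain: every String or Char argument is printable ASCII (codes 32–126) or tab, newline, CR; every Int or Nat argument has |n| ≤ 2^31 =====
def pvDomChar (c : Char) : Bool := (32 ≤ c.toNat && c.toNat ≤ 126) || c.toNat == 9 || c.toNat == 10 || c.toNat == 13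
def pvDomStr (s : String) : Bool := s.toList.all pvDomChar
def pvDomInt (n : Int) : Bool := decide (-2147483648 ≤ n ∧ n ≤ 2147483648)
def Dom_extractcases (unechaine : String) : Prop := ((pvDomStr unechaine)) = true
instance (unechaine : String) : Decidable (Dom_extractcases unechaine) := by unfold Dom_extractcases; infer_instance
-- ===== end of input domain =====

-- B replaces A's single loop with two accumulators by two independent filter passes; objective: idiomatic.

-- ===== PORT A =====
-- A: one loop over the string, routing each char into minustring or majustring.
def extractcasesLoop (cs : List Char) (minu maju : List Char) : List Char × List Char :=
  match cs with
  | [] => (minu, maju)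
  | c :: rest =>
    if 'a' ≤ c ∧ c ≤ 'z' then extractcasesLoop rest (minu ++ [c]) maju
    else if 'A' ≤ c ∧ c ≤ 'Z' then extractcasesLoop rest minu (maju ++ [c])
    else extractcasesLoop rest minu maju

def extractcases (unechaine : String) : List String :=
  let p := extractcasesLoop unechaine.toList [] []
  [String.mk p.1, String.mk p.2]

-- ===== PORT B =====
-- B: two independent filtered passes.
def extractcases_alt (unechaine : String) : List String :=
  [String.mk (unechaine.toList.filter (fun c => decide ('a' ≤ c ∧ c ≤ 'z'))),
   String.mk (unechaine.toList.filter (fun c => decide ('A' ≤ c ∧ c ≤ 'Z')))]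

-- ===== PRECONDITION & SPEC =====
def Spec_extractcases (unechaine : String) (out : List String) : Prop := out = extractcases_alt unechaine
instance (unechaine : String) (out : List String) : Decidable (Spec_extractcases unechaine out) := by unfold Spec_extractcases; infer_instance

-- ===== CLAIM (what is proved, stated in full; the proofs are below) =====
def Claim_equal_extractcases : Prop := ∀ (unechaine : String), Dom_extractcases unechaine → Spec_extractcases unechaine (extractcases unechaine)

-- ===== LEMMAS AND PROOFS =====
theorem extractcasesLoop_eq (cs : List Char) (minu maju : List Char) :
    extractcasesLoop cs minu maju =
      (minu ++ cs.filter (fun c => decide ('a' ≤ c ∧ c ≤ 'z')),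
       maju ++ cs.filter (fun c => decide ('A' ≤ c ∧ c ≤ 'Z'))) := by
  induction cs generalizing minu maju with
  | nil => simp [extractcasesLoop]
  | cons c rest ih =>
    by_cases hl : 'a' ≤ c ∧ c ≤ 'z'
    · have hu : ¬ ('A' ≤ c ∧ c ≤ 'Z') := by
        rcases hl with ⟨h1, _⟩
        intro ⟨_, h4⟩
        exact absurd (le_trans h1 h4) (by decide)
      simp [extractcasesLoop, hl, hu, ih]
    · by_cases hu : 'A' ≤ c ∧ c ≤ 'Z' <;> simp [extractcasesLoop, hl, hu, ih]

-- ===== VERDICT (by name: the statement is the Claim_ definition above) =====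
theorem extractcases_spec : Claim_equal_extractcases := by
  intro s _
  unfold Spec_extractcases extractcases extractcases_alt
  simp [extractcasesLoop_eq]
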